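-- pv_equiv track=rewrite | github.com/AdamSimkinbgu/Intro-to-CS-Python-Assignments | Assignment3-DictsListsStringManipulationJsonLikeBehavior/assignment3.py | is_DNA
-- ===== SOURCE A (Python) =====
-- def is_DNA(DNA_seq):
--     """
--     This method inspects a given string to confirm it's a DNA sample. If so, registers a list of each cell of DNA
--     @param: DNA_seq [str] - A given string to inspect.
--     @return: converted_seq [list] - A list containing the DNA cells in each index.
--     """
--     converted_seq = []
--     DNA_string = ''
--     place_in_DNA = 0
--     allowed_letters = ['A', 'C', 'G', 'T']
--     for DNA_letter in DNA_seq: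
--         place_in_DNA += 1
--         if place_in_DNA % 4 == 0:
--             converted_seq.append(DNA_string)
--             DNA_string = ''
--             if DNA_letter == (' '):
--                 continue
--             else:
--                 return 'Not DNA seq'
--         elif DNA_letter in allowed_letters:
--             DNA_string += DNA_letter
--         else:
--             return 'Not DNA seq'
--     if len(DNA_string) != (0 or 3):
--         return 'Not DNA seq'
--     else:
--         converted_seq.append(DNA_string)
--     return converted_seq
-- ===== SOURCE B (Python) =====
-- def is_DNA(DNA_seq):
--     """Tokenize on single spaces, then validate each codon (length 3, letters ACGT)."""
--     converted_seq = []
--     for codon in DNA_seq.split(' '):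
--         if len(codon) != 3:
--             return 'Not DNA seq'
--         for ch in codon:
--             if ch not in 'ACGT':
--                 return 'Not DNA seq'
--         converted_seq.append(codon)
--     return converted_seq
-- ===== Notes on version B (the rewrite author's own statement) =====
-- stated objective: idiomatic
-- what changed: Replaces A's per-character position-mod-4 state machine with a tokenize-then-validate pass: split the string once on single-space separators, then check each codon has length 3 and only ACGT letters.
import Mathlib
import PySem

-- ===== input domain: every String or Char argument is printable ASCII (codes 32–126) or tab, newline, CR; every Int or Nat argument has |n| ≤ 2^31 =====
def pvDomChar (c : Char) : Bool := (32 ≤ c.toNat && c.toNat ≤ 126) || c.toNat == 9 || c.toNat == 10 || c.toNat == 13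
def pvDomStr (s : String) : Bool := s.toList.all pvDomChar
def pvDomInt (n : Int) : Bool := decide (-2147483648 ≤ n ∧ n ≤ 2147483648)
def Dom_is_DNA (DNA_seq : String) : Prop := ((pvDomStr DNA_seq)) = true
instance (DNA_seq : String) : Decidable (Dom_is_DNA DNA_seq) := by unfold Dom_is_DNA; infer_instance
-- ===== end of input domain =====

-- B replaces A's per-character position-mod-4 state machine by split(' ')-then-validate (idiomatic, same cost).
-- Both Pythons return a LIST of codons on valid DNA and the string 'Not DNA seq' otherwise; under the
-- String-typed signature both ports render that list as Python's repr string, identically on both sides.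

-- ===== PORT A =====
def allowedA : List Char := ['A', 'C', 'G', 'T']

-- Python's repr of the returned list of codons (both Pythons return a list there)
def pyReprCodons (ts : List (List Char)) : String :=
  "[" ++ String.intercalate ", " (ts.map (fun t => "'" ++ String.ofList t ++ "'")) ++ "]"

def isDnaLoopA (cs : List Char) (conv : List (List Char)) (cur : List Char) (place : Nat) :
    Option (List (List Char)) :=
  match cs with
  | [] =>
      -- A's `len(DNA_string) != (0 or 3)` is `!= 3`
      if cur.length ≠ 3 then none else some (conv ++ [cur])
  | c :: rest =>
      if (place + 1) % 4 = 0 then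
        if c = ' ' then isDnaLoopA rest (conv ++ [cur]) [] (place + 1) else none
      else if c ∈ allowedA then isDnaLoopA rest conv (cur ++ [c]) (place + 1)
      else none

def is_DNA (DNA_seq : String) : String :=
  match isDnaLoopA DNA_seq.toList [] [] 0 with
  | none => "Not DNA seq"
  | some ts => pyReprCodons ts

-- ===== PORT B =====
def allowedB : List Char := ['A', 'C', 'G', 'T']

def isDnaLoopB (toks : List (List Char)) (acc : List (List Char)) : Option (List (List Char)) :=
  match toks with
  | [] => some acc
  | t :: ts =>
      if t.length ≠ 3 then none
      else if t.all (fun ch => ch ∈ allowedB) then isDnaLoopB ts (acc ++ [t])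
      else none

def is_DNA_alt (DNA_seq : String) : String :=
  match isDnaLoopB (DNA_seq.toList.splitOn ' ') [] with
  | none => "Not DNA seq"
  | some ts => pyReprCodons ts

-- ===== PRECONDITION & SPEC =====
def Spec_is_DNA (DNA_seq : String) (out : String) : Prop := out = is_DNA_alt DNA_seq
instance (DNA_seq : String) (out : String) : Decidable (Spec_is_DNA DNA_seq out) := by unfold Spec_is_DNA; infer_instance

-- ===== CLAIM (what is proved, stated in full; the proofs are below) =====
def Claim_equal_is_DNA : Prop := ∀ (DNA_seq : String), Dom_is_DNA DNA_seq → Spec_is_DNA DNA_seq (is_DNA DNA_seq)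

-- ===== LEMMAS AND PROOFS =====

lemma splitOnP_ne_nil (l : List Char) : List.splitOnP (· == ' ') l ≠ [] := by
  induction l with
  | nil => simp
  | cons c cs ih =>
      rw [List.splitOnP_cons]
      split_ifs
      · simp
      · cases h : List.splitOnP (· == ' ') cs with
        | nil => exact absurd h ih
        | cons t ts => simp

lemma splitOn_cons_space (l : List Char) : (' ' :: l).splitOn ' ' = [] :: l.splitOn ' ' := by
  simp [List.splitOn, List.splitOnP_cons]

lemma splitOn_append_nospace (pre l : List Char) (h : ∀ c ∈ pre, ¬ c = ' ') :
    (pre ++ l).splitOn ' ' = (pre ++ (l.splitOn ' ').headI) :: (l.splitOn ' ').tail := by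
  unfold List.splitOn
  induction pre with
  | nil =>
      cases hl : List.splitOnP (· == ' ') l with
      | nil => exact absurd hl (splitOnP_ne_nil l)
      | cons t ts => simp [hl]
  | cons c cs ih =>
      have hc : ¬ c = ' ' := h c (by simp)
      have ihs := ih (fun x hx => h x (by simp [hx]))
      rw [List.cons_append, List.splitOnP_cons, if_neg (by simpa using hc), ihs]
      simp

lemma splitOn_nospace (l : List Char) (h : ∀ c ∈ l, ¬ c = ' ') : l.splitOn ' ' = [l] := by
  have := splitOn_append_nospace l [] h
  simpa [List.splitOn] using this

lemma allowed_ne_space {c : Char} (h : c ∈ allowedA) : ¬ c = ' ' := by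
  simp [allowedA] at h
  rcases h with h | h | h | h <;> simp [h]

lemma loopB_len_ne (t : List Char) (ts acc : List (List Char)) (h : t.length ≠ 3) :
    isDnaLoopB (t :: ts) acc = none := by
  simp [isDnaLoopB, h]

lemma loopB_bad_char (t : List Char) (ts acc : List (List Char)) {c : Char}
    (hc : c ∈ t) (hb : ¬ c ∈ allowedB) : isDnaLoopB (t :: ts) acc = none := by
  have hallf : t.all (fun ch => ch ∈ allowedB) = false := by
    rw [List.all_eq_false]
    exact ⟨c, hc, by simpa using hb⟩
  by_cases h1 : t.length = 3
  · simp [isDnaLoopB, h1, hallf]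
  · simp [isDnaLoopB, h1]

lemma loopB_good (t : List Char) (ts acc : List (List Char)) (h3 : t.length = 3)
    (hall : ∀ c ∈ t, c ∈ allowedB) : isDnaLoopB (t :: ts) acc = isDnaLoopB ts (acc ++ [t]) := by
  have hb : t.all (fun ch => ch ∈ allowedB) = true := by
    simp only [List.all_eq_true]
    intro c hc
    simpa using hall c hc
  simp [isDnaLoopB, h3, hb]

lemma allowedA_sub {c : Char} (h : c ∈ allowedA) : c ∈ allowedB := by
  simpa [allowedB] using (by simpa [allowedA] using h : c = 'A' ∨ c = 'C' ∨ c = 'G' ∨ c = 'T')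

lemma loop_eq (cs : List Char) : ∀ (conv : List (List Char)) (cur : List Char) (place : Nat),
    place % 4 = cur.length → (∀ c ∈ cur, c ∈ allowedA) →
    isDnaLoopA cs conv cur place = isDnaLoopB ((cur ++ cs).splitOn ' ') conv := by
  induction cs with
  | nil =>
      intro conv cur place hp hall
      have hns : ∀ c ∈ cur, ¬ c = ' ' := fun c hc => allowed_ne_space (hall c hc)
      rw [List.append_nil, splitOn_nospace cur hns]
      by_cases h3 : cur.length = 3
      · rw [loopB_good cur [] conv h3 (fun c hc => allowedA_sub (hall c hc))]
        simp [isDnaLoopA, isDnaLoopB, h3]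
      · rw [loopB_len_ne cur [] conv h3]
        simp [isDnaLoopA, h3]
  | cons c rest ih =>
      intro conv cur place hp hall
      have hns : ∀ x ∈ cur, ¬ x = ' ' := fun x hx => allowed_ne_space (hall x hx)
      by_cases h4 : (place + 1) % 4 = 0
      · -- cur.length = 3 here
        have h3 : cur.length = 3 := by omega
        by_cases hsp : c = ' '
        · subst hsp
          rw [show cur ++ ' ' :: rest = cur ++ ([' '] ++ rest) from by simp]
          rw [splitOn_append_nospace cur ([' '] ++ rest) hns]
          rw [show ([' '] ++ rest : List Char) = ' ' :: rest from rfl, splitOn_cons_space]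
          have hrec := ih (conv ++ [cur]) [] (place + 1) (by simp [h4]) (by simp)
          simp only [List.nil_append] at hrec
          simp only [isDnaLoopA, if_pos h4]
          rw [hrec, List.headI_cons, List.tail_cons, List.append_nil,
              loopB_good cur _ conv h3 (fun x hx => allowedA_sub (hall x hx))]
          simp
        · -- non-space at a multiple-of-4 position: A fails; B's first token is too long
          rw [show cur ++ c :: rest = (cur ++ [c]) ++ rest from by simp]
          rw [splitOn_append_nospace (cur ++ [c]) rest
              (by intro x hx; simp at hx; rcases hx with hx | hx
                  · exact hns x hx
                  · simpa [hx] using hsp)]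
          rw [loopB_len_ne _ _ conv (by simp; omega)]
          simp [isDnaLoopA, h4, hsp]
      · -- position not a multiple of 4: cur.length ≤ 2
        have h3 : cur.length ≤ 2 := by omega
        by_cases hmem : c ∈ allowedA
        · have hrec := ih conv (cur ++ [c]) (place + 1)
              (by simp; omega)
              (by intro x hx; simp at hx; rcases hx with hx | hx
                  · exact hall x hx
                  · simpa [hx] using hmem)
          simp only [isDnaLoopA, if_neg h4, if_pos hmem]
          rw [hrec, show (cur ++ [c]) ++ rest = cur ++ c :: rest from by simp]
        · by_cases hsp : c = ' '
          · subst hsp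
            rw [show cur ++ ' ' :: rest = cur ++ ([' '] ++ rest) from by simp]
            rw [splitOn_append_nospace cur ([' '] ++ rest) hns]
            rw [show ([' '] ++ rest : List Char) = ' ' :: rest from rfl, splitOn_cons_space]
            rw [List.headI_cons, List.tail_cons, List.append_nil,
                loopB_len_ne cur _ conv (by omega)]
            simp [isDnaLoopA, if_neg h4, hmem]
          · rw [show cur ++ c :: rest = (cur ++ [c]) ++ rest from by simp]
            rw [splitOn_append_nospace (cur ++ [c]) rest
                (by intro x hx; simp at hx; rcases hx with hx | hx
                    · exact hns x hx
                    · simpa [hx] using hsp)]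
            have hbB : ¬ c ∈ allowedB := by
              intro hb
              exact hmem (by simpa [allowedA] using (by simpa [allowedB] using hb :
                c = 'A' ∨ c = 'C' ∨ c = 'G' ∨ c = 'T'))
            rw [loopB_bad_char _ _ conv (c := c) (by simp) hbB]
            simp [isDnaLoopA, if_neg h4, hmem]

lemma ports_agree (s : String) : is_DNA s = is_DNA_alt s := by
  unfold is_DNA is_DNA_alt
  rw [loop_eq s.toList [] [] 0 (by simp) (by simp)]
  simp

-- ===== VERDICT (by name: the statement is the Claim_ definition above) =====
theorem is_DNA_spec : Claim_equal_is_DNA := by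
  intro s _
  unfold Spec_is_DNA
  exact ports_agree s
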